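-- pv_equiv track=rewrite | github.com/breezy-team/breezy | breezy/bzr/btree_index.py | _multi_bisect_right
-- ===== SOURCE A (Python) =====
-- def _multi_bisect_right(in_keys, fixed_keys):
--     """Find the positions where each 'in_key' would fit in fixed_keys.
--
--     This is equivalent to doing "bisect_right" on each in_key into
--     fixed_keys
--
--     :param in_keys: A sorted list of keys to match with fixed_keys
--     :param fixed_keys: A sorted list of keys to match against
--     :return: A list of (integer position, [key list]) tuples.
--     """
--     if not in_keys:
--         return []
--     if not fixed_keys:
--         # no pointers in the fixed_keys list, which means everything must
--         # fall to the left.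
--         return [(0, in_keys)]
--
--     # TODO: Iterating both lists will generally take M + N steps
--     #       Bisecting each key will generally take M * log2 N steps.
--     #       If we had an efficient way to compare, we could pick the method
--     #       based on which has the fewer number of steps.
--     #       There is also the argument that bisect_right is a compiled
--     #       function, so there is even more to be gained.
--     # iter_steps = len(in_keys) + len(fixed_keys)
--     # bisect_steps = len(in_keys) * math.log(len(fixed_keys), 2)
--     if len(in_keys) == 1:  # Bisect will always be faster for M = 1
--         return [(bisect.bisect_right(fixed_keys, in_keys[0]), in_keys)]
--     # elif bisect_steps < iter_steps:
--     #     offsets = {}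
--     #     for key in in_keys:
--     #         offsets.setdefault(bisect_right(fixed_keys, key),
--     #                            []).append(key)
--     #     return [(o, offsets[o]) for o in sorted(offsets)]
--     in_keys_iter = iter(in_keys)
--     fixed_keys_iter = enumerate(fixed_keys)
--     cur_in_key = next(in_keys_iter)
--     cur_fixed_offset, cur_fixed_key = next(fixed_keys_iter)
--
--     class InputDone(Exception):
--         pass
--
--     class FixedDone(Exception):
--         pass
--
--     output = []
--     cur_out = []
--
--     # TODO: Another possibility is that rather than iterating on each side,
--     #       we could use a combination of bisecting and iterating. For
--     #       example, while cur_in_key < fixed_key, bisect to find its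
--     #       point, then iterate all matching keys, then bisect (restricted
--     #       to only the remainder) for the next one, etc.
--     try:
--         while True:
--             if cur_in_key < cur_fixed_key:
--                 cur_keys = []
--                 cur_out = (cur_fixed_offset, cur_keys)
--                 output.append(cur_out)
--                 while cur_in_key < cur_fixed_key:
--                     cur_keys.append(cur_in_key)
--                     try:
--                         cur_in_key = next(in_keys_iter)
--                     except StopIteration as exc:
--                         raise InputDone from exc
--                 # At this point cur_in_key must be >= cur_fixed_key
--             # step the cur_fixed_key until we pass the cur key, or walk off
--             # the end
--             while cur_in_key >= cur_fixed_key: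
--                 try:
--                     cur_fixed_offset, cur_fixed_key = next(fixed_keys_iter)
--                 except StopIteration as exc:
--                     raise FixedDone from exc
--     except InputDone:
--         # We consumed all of the input, nothing more to do
--         pass
--     except FixedDone:
--         # There was some input left, but we consumed all of fixed, so we
--         # have to add one more for the tail
--         cur_keys = [cur_in_key]
--         cur_keys.extend(in_keys_iter)
--         cur_out = (len(fixed_keys), cur_keys)
--         output.append(cur_out)
--     return output
-- ===== SOURCE B (Python) =====
-- def _multi_bisect_right(in_keys, fixed_keys):
--     """Find the positions where each 'in_key' would fit in fixed_keys.
--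
--     One pass over fixed_keys: for each fixed key take the run of remaining
--     in_keys that sort before it; whatever is left falls after all fixed keys.
--     """
--     if not in_keys:
--         return []
--     output = []
--     i = 0
--     n = len(in_keys)
--     for off, fk in enumerate(fixed_keys):
--         j = i
--         while j < n and in_keys[j] < fk:
--             j += 1
--         if j > i:
--             output.append((off, in_keys[i:j]))
--             i = j
--     if i < n:
--         output.append((len(fixed_keys), in_keys[i:]))
--     return output
-- ===== Notes on version B (the rewrite author's own statement) =====
-- stated objective: simpler
-- what changed: Replaces A's two-iterator merge driven by InputDone/FixedDone exceptions and an inner bisect special case with one plain for-loop over fixed_keys that slices off each run of in_keys, plus a single tail append; Pre_ excludes only the inputs where A raises NameError (len(in_keys)==1 with non-empty fixed_keys: A's bisect branch uses the never-imported bisect module), where B returns the normal one-group result.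
import Mathlib
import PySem

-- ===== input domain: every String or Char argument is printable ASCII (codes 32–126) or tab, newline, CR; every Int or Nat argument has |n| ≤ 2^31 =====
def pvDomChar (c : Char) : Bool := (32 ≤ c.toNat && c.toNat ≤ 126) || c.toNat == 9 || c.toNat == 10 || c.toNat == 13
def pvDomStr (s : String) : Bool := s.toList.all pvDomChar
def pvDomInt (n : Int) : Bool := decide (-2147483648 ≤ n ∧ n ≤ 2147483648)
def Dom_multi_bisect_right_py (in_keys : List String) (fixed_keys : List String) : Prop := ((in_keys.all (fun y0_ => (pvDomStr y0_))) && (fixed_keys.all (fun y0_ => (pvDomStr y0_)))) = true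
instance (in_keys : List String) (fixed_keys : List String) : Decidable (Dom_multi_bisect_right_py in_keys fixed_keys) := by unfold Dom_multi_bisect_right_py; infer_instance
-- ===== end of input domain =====

-- B replaces A's two-iterator, exception-driven merge by one plain loop over fixed_keys that
-- slices runs off in_keys (simpler, same O(M+N) cost; same return value wherever A returns).

-- ===== PORT A =====
-- the inner 'while cur_in_key < cur_fixed_key: cur_keys.append(...)' loop: returns the collected
-- group and the remaining input (none = InputDone)
def pvCollect (ci : String) (ins : List String) (fk : String) :
    List String × Option (String × List String) :=
  if ci < fk then
    match ins with
    | [] => ([ci], none)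
    | x :: xs =>
      let r := pvCollect x xs fk
      (ci :: r.1, r.2)
  else ([], some (ci, ins))

-- the 'while cur_in_key >= cur_fixed_key: next(fixed_keys_iter)' loop (entered with
-- cur_in_key >= cur_fixed_key, as A's own comment notes): none = FixedDone
def pvAdvance (ci : String) (frest : List (Int × String)) :
    Option (Int × String × List (Int × String)) :=
  match frest with
  | [] => none
  | (o, k) :: r => if ci < k then some (o, k, r) else pvAdvance ci r

-- termination helper for pvLoop: pvAdvance only consumes
theorem pvAdvance_length (ci : String) (frest : List (Int × String))
    (o : Int) (k : String) (r : List (Int × String))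
    (h : pvAdvance ci frest = some (o, k, r)) : r.length < frest.length := by
  induction frest with
  | nil => simp [pvAdvance] at h
  | cons hd tl ih =>
    obtain ⟨o', k'⟩ := hd
    simp only [pvAdvance] at h
    split at h
    · simp only [Option.some.injEq, Prod.mk.injEq] at h
      obtain ⟨-, -, rfl⟩ := h
      simp
    · exact (ih h).trans (by simp)

-- the 'while True' loop of A
def pvLoop (ci : String) (ins : List String) (off : Int) (fk : String)
    (frest : List (Int × String)) (nfixed : Int) (out : List (Int × List String)) :
    List (Int × List String) :=
  let c := pvCollect ci ins fk
  let out' := if c.1.isEmpty then out else out ++ [(off, c.1)]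
  match c.2 with
  | none => out'                                   -- InputDone
  | some (ci', ins') =>
    match h : pvAdvance ci' frest with
    | none => out' ++ [(nfixed, ci' :: ins')]      -- FixedDone: tail group
    | some (o, k, fr) => pvLoop ci' ins' o k fr nfixed out'
termination_by frest.length
decreasing_by exact pvAdvance_length _ _ _ _ _ h

def multi_bisect_right_py (in_keys : List String) (fixed_keys : List String) :
    List (Int × List String) :=
  match in_keys with
  | [] => []
  | ci :: ins =>
    match fixed_keys with
    | [] => [(0, in_keys)]
    | f0 :: frest_keys =>
      -- the 'len(in_keys) == 1' branch is unreachable inside Pre_ (on it the Python raises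
      -- NameError: this module never imports bisect); ported as the intended bisect_right
      if ins.isEmpty then
        [((PySem.List.bisectRight fixed_keys ci : Int), in_keys)]
      else
        pvLoop ci ins 0 f0 (PySem.List.enumerate frest_keys 1) (fixed_keys.length : Int) []

-- ===== PORT B =====
-- the inner 'while j < n and in_keys[j] < fk: j += 1' loop of Source B (fuel = n - j makes it
-- structural; called with enough fuel it is exact)
def pvRun (inks : List String) (fk : String) : Nat → Nat → Nat
  | 0, j => j
  | fuel + 1, j =>
    if h : j < inks.length then
      if inks[j] < fk then pvRun inks fk fuel (j + 1) else j
    else j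

def multi_bisect_right_py_alt (in_keys : List String) (fixed_keys : List String) :
    List (Int × List String) :=
  if in_keys.isEmpty then []
  else
    let n := in_keys.length
    let st := (PySem.List.enumerate fixed_keys).foldl
      (fun (st : Nat × List (Int × List String)) (p : Int × String) =>
        let j := pvRun in_keys p.2 (n - st.1) st.1
        if st.1 < j then
          (j, st.2 ++ [(p.1, PySem.List.slice in_keys (some (st.1 : Int)) (some (j : Int)))])
        else st) (0, [])
    if st.1 < n then
      st.2 ++ [((fixed_keys.length : Int), PySem.List.slice in_keys (some (st.1 : Int)) none)]
    else st.2

-- ===== PRECONDITION & SPEC =====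
-- Pre_ excludes exactly the inputs on which A raises NameError: its single-key branch calls
-- bisect.bisect_right, but the module never imports bisect, so len(in_keys) == 1 with a
-- non-empty fixed_keys never returns.
def Pre_multi_bisect_right_py (in_keys : List String) (fixed_keys : List String) : Prop :=
  ¬ (in_keys.length = 1 ∧ fixed_keys ≠ [])
instance (in_keys : List String) (fixed_keys : List String) : Decidable (Pre_multi_bisect_right_py in_keys fixed_keys) := by unfold Pre_multi_bisect_right_py; infer_instance

def pvWitness_multi_bisect_right_py : List String × List String := (["a", "c"], ["b"])

def Spec_multi_bisect_right_py (in_keys : List String) (fixed_keys : List String) (out : List (Int × List String)) : Prop := out = multi_bisect_right_py_alt in_keys fixed_keys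
instance (in_keys : List String) (fixed_keys : List String) (out : List (Int × List String)) : Decidable (Spec_multi_bisect_right_py in_keys fixed_keys out) := by unfold Spec_multi_bisect_right_py; infer_instance

-- ===== CLAIM (what is proved, stated in full; the proofs are below) =====
def Claim_equal_multi_bisect_right_py : Prop := ∀ (in_keys : List String) (fixed_keys : List String), Dom_multi_bisect_right_py in_keys fixed_keys → Pre_multi_bisect_right_py in_keys fixed_keys → Spec_multi_bisect_right_py in_keys fixed_keys (multi_bisect_right_py in_keys fixed_keys)


-- ===== LEMMAS AND PROOFS =====

-- the common value of both programs: walk the fixed keys, peeling off each run of input keys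
-- that sort before the current fixed key; the leftover goes after all fixed keys
def pvM (nf : Int) : List String → Int → List String → List (Int × List String)
  | ins, _, [] => if ins.isEmpty then [] else [(nf, ins)]
  | ins, off, fk :: fr =>
    (if (ins.takeWhile (fun y => decide (y < fk))).isEmpty then []
     else [(off, ins.takeWhile (fun y => decide (y < fk)))]) ++
    pvM nf (ins.dropWhile (fun y => decide (y < fk))) (off + 1) fr

theorem pvM_nil (nf : Int) : ∀ (fl : List String) (off : Int), pvM nf [] off fl = [] := by
  intro fl
  induction fl with
  | nil => intro off; rfl
  | cons fk fr ih => intro off; simpa [pvM] using ih (off + 1)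

-- fixed keys the current input head is ≥ of contribute empty groups
theorem pvM_skip (nf : Int) (ci : String) (ins : List String) :
    ∀ (skip : List String) (off : Int) (rest : List String),
      (∀ k ∈ skip, ¬ ci < k) →
      pvM nf (ci :: ins) off (skip ++ rest) = pvM nf (ci :: ins) (off + (skip.length : Int)) rest := by
  intro skip
  induction skip with
  | nil => intro off rest _; simp
  | cons k ks ih =>
    intro off rest hall
    have hk : ¬ ci < k := hall k (by simp)
    rw [List.cons_append, pvM, List.takeWhile_cons_of_neg (by simp [hk]),
      List.dropWhile_cons_of_neg (by simp [hk]), ih (off + 1) rest (fun k' hk' => hall k' (by simp [hk']))]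
    have hoff : off + 1 + (ks.length : Int) = off + ((ks.length + 1 : Nat) : Int) := by
      push_cast; ring
    rw [List.length_cons, ← hoff]
    simp

-- pvCollect computes the takeWhile/dropWhile split of the input at fk
theorem pvCollect_eq (fk : String) : ∀ (ins : List String) (ci : String),
    pvCollect ci ins fk =
      ((ci :: ins).takeWhile (fun y => decide (y < fk)),
       match (ci :: ins).dropWhile (fun y => decide (y < fk)) with
       | [] => none
       | a :: b => some (a, b)) := by
  intro ins
  induction ins with
  | nil =>
    intro ci
    by_cases h : ci < fk
    · rw [pvCollect, if_pos h, List.takeWhile_cons_of_pos (by simp [h]),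
        List.dropWhile_cons_of_pos (by simp [h])]
      rfl
    · rw [pvCollect, if_neg h, List.takeWhile_cons_of_neg (by simp [h]),
        List.dropWhile_cons_of_neg (by simp [h])]
  | cons x xs ih =>
    intro ci
    by_cases h : ci < fk
    · rw [pvCollect, if_pos h, List.takeWhile_cons_of_pos (by simp [h]),
        List.dropWhile_cons_of_pos (by simp [h])]
      rw [ih x]
    · rw [pvCollect, if_neg h, List.takeWhile_cons_of_neg (by simp [h]),
        List.dropWhile_cons_of_neg (by simp [h])]

-- pvAdvance on an enumerated suffix: skips exactly the keys ≤ ci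
theorem pvAdvance_enum_none (ci : String) : ∀ (l : List String) (s : Int),
    l.dropWhile (fun k => !decide (ci < k)) = [] →
    pvAdvance ci (PySem.List.enumerate l s) = none := by
  intro l
  induction l with
  | nil => intro s _; simp [PySem.List.enumerate_nil, pvAdvance]
  | cons x xs ih =>
    intro s h
    by_cases hlt : ci < x
    · rw [List.dropWhile_cons_of_neg (by simp [hlt])] at h
      exact absurd h (by simp)
    · rw [List.dropWhile_cons_of_pos (by simp [hlt])] at h
      rw [PySem.List.enumerate_cons, pvAdvance, if_neg hlt]
      exact ih (s + 1) h

theorem pvAdvance_enum_some (ci : String) : ∀ (l : List String) (s : Int) (k : String)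
    (r : List String), l.dropWhile (fun k => !decide (ci < k)) = k :: r →
    pvAdvance ci (PySem.List.enumerate l s) =
      some (s + ((l.takeWhile (fun k => !decide (ci < k))).length : Int), k,
        PySem.List.enumerate r (s + ((l.takeWhile (fun k => !decide (ci < k))).length : Int) + 1)) := by
  intro l
  induction l with
  | nil => intro s k r h; simp at h
  | cons x xs ih =>
    intro s k r h
    by_cases hlt : ci < x
    · rw [List.dropWhile_cons_of_neg (by simp [hlt])] at h
      injection h with h1 h2
      subst h1; subst h2
      rw [PySem.List.enumerate_cons, pvAdvance, if_pos hlt,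
        List.takeWhile_cons_of_neg (by simp [hlt])]
      norm_num
    · rw [List.dropWhile_cons_of_pos (by simp [hlt])] at h
      rw [PySem.List.enumerate_cons, pvAdvance, if_neg hlt, ih (s + 1) k r h,
        List.takeWhile_cons_of_pos (by simp [hlt]), List.length_cons]
      have harith : (s + 1) + ((xs.takeWhile (fun k => !decide (ci < k))).length : Int)
          = s + (((xs.takeWhile (fun k => !decide (ci < k))).length + 1 : Nat) : Int) := by
        push_cast; ring
      rw [harith]

theorem pvDropWhile_eq_drop {α : Type} (p : α → Bool) :
    ∀ l : List α, l.dropWhile p = l.drop (l.takeWhile p).length := by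
  intro l
  induction l with
  | nil => rfl
  | cons x xs ih =>
    by_cases h : p x = true
    · rw [List.dropWhile_cons_of_pos h, List.takeWhile_cons_of_pos h, List.length_cons,
        List.drop_succ_cons, ih]
    · rw [List.dropWhile_cons_of_neg h, List.takeWhile_cons_of_neg h]
      rfl

theorem pvTakeWhile_eq_take {α : Type} (p : α → Bool) :
    ∀ l : List α, l.takeWhile p = l.take (l.takeWhile p).length := by
  intro l
  induction l with
  | nil => rfl
  | cons x xs ih =>
    by_cases h : p x = true
    · rw [List.takeWhile_cons_of_pos h, List.length_cons, List.take_succ_cons, ← ih]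
    · rw [List.takeWhile_cons_of_neg h]
      rfl

-- A's merge loop computes pvM of the remaining input against the remaining fixed keys
theorem pvLoop_eq (nfix : Int) :
    ∀ (d : Nat) (fl : List String), fl.length ≤ d →
    ∀ (off : Int) (fk : String) (ci : String) (ins : List String)
      (out : List (Int × List String)),
    pvLoop ci ins off fk (PySem.List.enumerate fl (off + 1)) nfix out
      = out ++ pvM nfix (ci :: ins) off (fk :: fl) := by
  intro d
  induction d with
  | zero =>
    intro fl hfl off fk ci ins out
    have : fl = [] := List.length_eq_zero_iff.mp (Nat.le_zero.mp hfl)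
    subst this
    rw [pvLoop, pvCollect_eq]
    cases hdrop : (ci :: ins).dropWhile (fun y => decide (y < fk)) with
    | nil =>
      simp only []
      rw [pvM, hdrop, pvM_nil]
      split <;> simp
    | cons ci' ins' =>
      simp only []
      rw [pvAdvance_enum_none ci' [] (off + 1) rfl, pvM, hdrop, pvM]
      split
      next => split <;> simp
      next o k fr heq => exact absurd heq (by simp)
  | succ n ih =>
    intro fl hfl off fk ci ins out
    rw [pvLoop, pvCollect_eq]
    cases hdrop : (ci :: ins).dropWhile (fun y => decide (y < fk)) with
    | nil =>
      simp only []
      rw [pvM, hdrop, pvM_nil]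
      split <;> simp
    | cons ci' ins' =>
      simp only []
      rw [pvM, hdrop]
      cases hd2 : fl.dropWhile (fun k => !decide (ci' < k)) with
      | nil =>
        rw [pvAdvance_enum_none ci' fl (off + 1) hd2]
        have hskip : ∀ k ∈ fl, ¬ ci' < k := by
          intro k hk
          have := List.dropWhile_eq_nil_iff.mp hd2 k hk
          simpa using this
        have hfl' : pvM nfix (ci' :: ins') (off + 1) fl
            = pvM nfix (ci' :: ins') (off + 1 + (fl.length : Int)) [] := by
          conv_lhs => rw [show fl = fl ++ [] by simp]
          exact pvM_skip nfix ci' ins' fl (off + 1) [] hskip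
        rw [hfl', pvM]
        split
        next => split <;> simp
        next o k fr heq => exact absurd heq (by simp)
      | cons k2 r2 =>
        rw [pvAdvance_enum_some ci' fl (off + 1) k2 r2 hd2]
        have hsplit : fl.takeWhile (fun k => !decide (ci' < k)) ++ (k2 :: r2) = fl := by
          rw [← hd2]; exact List.takeWhile_append_dropWhile
        have hskip : ∀ k ∈ fl.takeWhile (fun k => !decide (ci' < k)), ¬ ci' < k := by
          intro k hk
          have := List.mem_takeWhile_imp hk
          simpa using this
        have hlen := congrArg List.length hsplit
        simp only [List.length_append, List.length_cons] at hlen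
        split
        next heq => exact absurd heq (by simp)
        next o k fr heq =>
          simp only [Option.some.injEq, Prod.mk.injEq] at heq
          obtain ⟨rfl, rfl, rfl⟩ := heq
          rw [ih r2 (by omega)
            (off + 1 + ((fl.takeWhile (fun k => !decide (ci' < k))).length : Int)) k2 ci' ins']
          conv_rhs => rw [← hsplit]
          rw [pvM_skip nfix ci' ins' _ (off + 1) (k2 :: r2) hskip]
          split <;> simp

-- the run loop of B finds the end of the takeWhile prefix of the remaining input
theorem pvRun_eq (inks : List String) (fk : String) :
    ∀ (fuel i : Nat), inks.length - i ≤ fuel →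
    pvRun inks fk fuel i = i + ((inks.drop i).takeWhile (fun y => decide (y < fk))).length := by
  intro fuel
  induction fuel with
  | zero =>
    intro i hi
    have : inks.drop i = [] := List.drop_eq_nil_of_le (by omega)
    rw [pvRun, this]
    simp
  | succ n ihf =>
    intro i hi
    rw [pvRun]
    by_cases h : i < inks.length
    · rw [dif_pos h]
      have hdropi : inks.drop i = inks[i] :: inks.drop (i + 1) := List.drop_eq_getElem_cons h
      by_cases hlt : inks[i] < fk
      · rw [if_pos hlt, ihf (i + 1) (by omega), hdropi,
          List.takeWhile_cons_of_pos (by simp [hlt])]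
        simp
        omega
      · rw [if_neg hlt, hdropi, List.takeWhile_cons_of_neg (by simp [hlt])]
        simp
    · rw [dif_neg h]
      have : inks.drop i = [] := List.drop_eq_nil_of_le (by omega)
      rw [this]
      simp

-- B's fold step, named for the proofs (syntactically the lambda in the port)
def pvStepB (inks : List String) :
    (Nat × List (Int × List String)) → (Int × String) → Nat × List (Int × List String) :=
  fun st p =>
    let j := pvRun inks p.2 (inks.length - st.1) st.1
    if st.1 < j then
      (j, st.2 ++ [(p.1, PySem.List.slice inks (some (st.1 : Int)) (some (j : Int)))])
    else st

-- one step of B's fold, with the run loop evaluated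
theorem pvStepB_eq (inks : List String) (i : Nat) (out : List (Int × List String))
    (off : Int) (fk : String) :
    pvStepB inks (i, out) (off, fk) =
      (if i < i + ((inks.drop i).takeWhile (fun y => decide (y < fk))).length then
        (i + ((inks.drop i).takeWhile (fun y => decide (y < fk))).length,
         out ++ [(off, PySem.List.slice inks (some (i : Int))
           (some ((i + ((inks.drop i).takeWhile (fun y => decide (y < fk))).length : Nat) : Int)))])
       else (i, out)) := by
  unfold pvStepB
  simp only []
  rw [pvRun_eq inks fk (inks.length - i) i le_rfl]

-- B's fold over the enumerated fixed keys, with the tail append, computes pvM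
theorem pvFoldB (inks : List String) (nf : Int) :
    ∀ (fl : List String) (off : Int) (i : Nat) (out : List (Int × List String)),
    (if (List.foldl (pvStepB inks) (i, out) (PySem.List.enumerate fl off)).1 < inks.length then
       (List.foldl (pvStepB inks) (i, out) (PySem.List.enumerate fl off)).2
         ++ [(nf, PySem.List.slice inks
              (some ((List.foldl (pvStepB inks) (i, out) (PySem.List.enumerate fl off)).1 : Int)) none)]
     else (List.foldl (pvStepB inks) (i, out) (PySem.List.enumerate fl off)).2)
      = out ++ pvM nf (inks.drop i) off fl := by
  intro fl
  induction fl with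
  | nil =>
    intro off i out
    simp only [PySem.List.enumerate_nil, List.foldl_nil]
    by_cases h : i < inks.length
    · rw [if_pos h, pvM, if_neg (by
        simp only [List.isEmpty_iff, List.drop_eq_nil_iff]
        omega), PySem.List.slice_from_natCast]
    · rw [if_neg h, pvM, if_pos (by
        simp only [List.isEmpty_iff, List.drop_eq_nil_iff]
        omega)]
      simp
  | cons fk fr ih =>
    intro off i out
    rw [PySem.List.enumerate_cons, List.foldl_cons, pvStepB_eq]
    by_cases ht : ((inks.drop i).takeWhile (fun y => decide (y < fk))).isEmpty = true
    · have ht0 : ((inks.drop i).takeWhile (fun y => decide (y < fk))).length = 0 := by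
        simpa [List.length_eq_zero_iff, List.isEmpty_iff] using ht
      rw [ht0, Nat.add_zero, if_neg (lt_irrefl i)]
      have hdw : (inks.drop i).dropWhile (fun y => decide (y < fk)) = inks.drop i := by
        rw [pvDropWhile_eq_drop, ht0, List.drop_zero]
      rw [ih (off + 1) i out, pvM, hdw, if_pos ht]
      simp
    · have ht0 : 0 < ((inks.drop i).takeWhile (fun y => decide (y < fk))).length := by
        rcases Nat.eq_zero_or_pos ((inks.drop i).takeWhile (fun y => decide (y < fk))).length
          with h0 | h0
        · exact absurd (by simpa [List.length_eq_zero_iff, List.isEmpty_iff] using h0) ht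
        · exact h0
      rw [if_pos (by omega : i < i + ((inks.drop i).takeWhile (fun y => decide (y < fk))).length)]
      rw [ih (off + 1) (i + ((inks.drop i).takeWhile (fun y => decide (y < fk))).length)
        (out ++ [(off, PySem.List.slice inks (some (i : Int))
          (some ((i + ((inks.drop i).takeWhile (fun y => decide (y < fk))).length : Nat) : Int)))])]
      have hslice : PySem.List.slice inks (some (i : Int))
          (some ((i + ((inks.drop i).takeWhile (fun y => decide (y < fk))).length : Nat) : Int))
          = (inks.drop i).takeWhile (fun y => decide (y < fk)) := by
        rw [PySem.List.slice_natCast]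
        rw [Nat.add_sub_cancel_left]
        exact (pvTakeWhile_eq_take _ (inks.drop i)).symm
      have hdrop2 : inks.drop (i + ((inks.drop i).takeWhile (fun y => decide (y < fk))).length)
          = (inks.drop i).dropWhile (fun y => decide (y < fk)) := by
        rw [pvDropWhile_eq_drop, List.drop_drop, Nat.add_comm]
      rw [hslice, hdrop2, pvM, if_neg ht]
      simp

-- B, unfolded to its fold, is pvM
theorem pvAlt_eq (x : String) (xs : List String) (fixed : List String) :
    multi_bisect_right_py_alt (x :: xs) fixed = pvM ((fixed.length : Nat) : Int) (x :: xs) 0 fixed := by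
  have h0 : multi_bisect_right_py_alt (x :: xs) fixed
      = (if (List.foldl (pvStepB (x :: xs)) (0, []) (PySem.List.enumerate fixed 0)).1
            < (x :: xs).length then
          (List.foldl (pvStepB (x :: xs)) (0, []) (PySem.List.enumerate fixed 0)).2
            ++ [(((fixed.length : Nat) : Int), PySem.List.slice (x :: xs)
                (some ((List.foldl (pvStepB (x :: xs)) (0, [])
                  (PySem.List.enumerate fixed 0)).1 : Int)) none)]
         else (List.foldl (pvStepB (x :: xs)) (0, []) (PySem.List.enumerate fixed 0)).2) := rfl
  rw [h0, pvFoldB (x :: xs) ((fixed.length : Nat) : Int) fixed 0 0 []]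
  simp

-- ===== VERDICT
theorem multi_bisect_right_py_spec : Claim_equal_multi_bisect_right_py := by
  intro in_keys fixed_keys _ hpre
  show multi_bisect_right_py in_keys fixed_keys = multi_bisect_right_py_alt in_keys fixed_keys
  cases in_keys with
  | nil => rfl
  | cons ci ins =>
    rw [pvAlt_eq]
    cases fixed_keys with
    | nil =>
      rw [show multi_bisect_right_py (ci :: ins) [] = [(0, ci :: ins)] from rfl, pvM]
      norm_num
    | cons f0 frest =>
      cases ins with
      | nil => exact absurd ⟨rfl, by simp⟩ hpre
      | cons x xs =>
        rw [show multi_bisect_right_py (ci :: x :: xs) (f0 :: frest)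
            = pvLoop ci (x :: xs) 0 f0 (PySem.List.enumerate frest 1)
                ((((f0 :: frest).length : Nat)) : Int) [] from rfl]
        have h := pvLoop_eq ((((f0 :: frest).length : Nat)) : Int) frest.length frest le_rfl
          0 f0 ci (x :: xs) []
        norm_num at h ⊢
        exact h
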